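-- pv_equiv track=rewrite | github.com/julianhumecki/Artifical-Intelligence-Programming | A1/Dev/source/solution.py | go_down_check_right
-- ===== SOURCE A (Python) =====
-- def go_down_check_right(curr_pos, all_dead_positions, all_obs, visited,  width, height,goal_pos, goal_found):
--   if curr_pos[1] == height:
--     return True
--   elif not (curr_pos in all_obs):
--     return False
--   elif curr_pos in visited:
--     return False
--
-- #   visited[curr_pos] = 1
--
--   status = go_down_check_right((curr_pos[0], curr_pos[1]+1), all_dead_positions, all_obs, visited,  width, height, goal_pos, goal_found)
--
--   if (curr_pos[0]+1,curr_pos[1]) == goal_pos: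
--       goal_found[0] = True
--
--   if not status:
--     if (curr_pos[0]+1, curr_pos[1]) in all_obs:
--       #do not add, as it is an obstacle
--       #but can add subsequent ones, cuz a wall was detected
--       return True
--     #dont add anything to dead_positions
--     return False
--   else:
--     #stuff under to all_dead_positions if not an obstacle
--     if not (curr_pos[0]+1,curr_pos[1]) in all_obs:
--       all_dead_positions[(curr_pos[0]+1,curr_pos[1])] = 1
--     return True
--
--   return False
-- ===== SOURCE B (Python) =====
-- def go_down_check_right(curr_pos, all_dead_positions, all_obs, visited, width, height, goal_pos, goal_found):
--     x, y = curr_pos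
--     # phase 1: walk down the column collecting positions until a base case stops us
--     chain = []
--     while y != height and (x, y) in all_obs and (x, y) not in visited:
--         chain.append((x, y))
--         y += 1
--     status = (y == height)
--     # phase 2: unwind in reverse, performing the per-level work
--     for (cx, cy) in reversed(chain):
--         right = (cx + 1, cy)
--         if right == goal_pos:
--             goal_found[0] = True
--         if not status:
--             status = right in all_obs
--         elif right not in all_obs:
--             all_dead_positions[right] = 1
--     return status
-- ===== Notes on version B (the rewrite author's own statement) =====
-- stated objective: alternative
-- what changed: Replaces the recursion with an explicit two-phase iteration: first an iterative walk down the column collecting the chain of positions, then a reverse loop over that chain carrying the status flag (simulating the unwinding of A's call stack).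
import Mathlib
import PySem

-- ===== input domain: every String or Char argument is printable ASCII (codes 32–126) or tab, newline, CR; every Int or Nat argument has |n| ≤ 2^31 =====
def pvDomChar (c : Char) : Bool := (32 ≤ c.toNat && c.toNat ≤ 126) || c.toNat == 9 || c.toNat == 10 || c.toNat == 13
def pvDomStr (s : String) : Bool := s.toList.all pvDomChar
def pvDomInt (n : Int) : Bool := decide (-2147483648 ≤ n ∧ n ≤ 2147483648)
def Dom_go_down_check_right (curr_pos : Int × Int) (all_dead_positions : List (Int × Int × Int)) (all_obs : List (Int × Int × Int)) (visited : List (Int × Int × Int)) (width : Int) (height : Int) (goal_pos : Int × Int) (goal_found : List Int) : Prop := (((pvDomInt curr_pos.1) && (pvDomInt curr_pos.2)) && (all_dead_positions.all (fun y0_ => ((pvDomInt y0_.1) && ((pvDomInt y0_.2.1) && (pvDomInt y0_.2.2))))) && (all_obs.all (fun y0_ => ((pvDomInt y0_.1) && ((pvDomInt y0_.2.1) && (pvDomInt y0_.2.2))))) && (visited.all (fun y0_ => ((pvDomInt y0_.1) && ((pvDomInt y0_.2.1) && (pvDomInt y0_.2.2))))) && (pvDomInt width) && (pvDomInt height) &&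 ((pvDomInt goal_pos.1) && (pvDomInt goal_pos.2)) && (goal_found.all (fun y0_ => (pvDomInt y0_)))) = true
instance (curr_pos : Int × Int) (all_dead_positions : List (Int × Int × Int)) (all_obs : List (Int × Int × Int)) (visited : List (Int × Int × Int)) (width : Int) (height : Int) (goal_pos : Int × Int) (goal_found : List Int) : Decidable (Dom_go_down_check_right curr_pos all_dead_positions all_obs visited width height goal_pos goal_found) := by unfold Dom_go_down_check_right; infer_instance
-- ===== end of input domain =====

-- B replaces A's recursion by a two-phase iteration (walk down collecting the chain, then fold
-- back in reverse); equivalence is about the RETURN value only — both Pythons perform the same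
-- in-place writes to all_dead_positions and goal_found, which the Bool-valued ports do not model.

-- countP strictly drops when some element satisfies p but not q (used for termination of both ports)
theorem pv_countP_lt {α : Type} (l : List α) (p q : α → Bool)
    (himp : ∀ a, q a = true → p a = true) (a : α) (ha : a ∈ l)
    (hpa : p a = true) (hqa : q a = false) : l.countP q < l.countP p := by
  induction l with
  | nil => cases ha
  | cons b t ih =>
    have hle : t.countP q ≤ t.countP p := List.countP_mono_left (fun x _ hx => himp x hx)
    rcases List.mem_cons.mp ha with h | h
    · subst h
      simp [hpa, hqa]
      omega
    · have := ih h
      simp only [List.countP_cons]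
      by_cases hq : q b = true
      · simp [hq, himp b hq]; omega
      · by_cases hp : p b = true
        · simp [hq, hp]; omega
        · simp [hq, hp]; omega

-- key membership test: Python's '(x, y) in d' for a dict keyed by pairs
def pvInKeys (p : Int × Int) (d : List (Int × Int × Int)) : Bool :=
  d.any (fun e => e.1 == p.1 && e.2.1 == p.2)

theorem pvInKeys_step (p : Int × Int) (d : List (Int × Int × Int)) (h : pvInKeys p d = true) :
    d.countP (fun e => e.1 == p.1 && decide (p.2 + 1 ≤ e.2.1)) <
    d.countP (fun e => e.1 == p.1 && decide (p.2 ≤ e.2.1)) := by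
  obtain ⟨e, he, hpe⟩ := List.any_eq_true.mp h
  simp only [Bool.and_eq_true, beq_iff_eq] at hpe
  obtain ⟨h1, h2⟩ := hpe
  refine pv_countP_lt d _ _ (fun a ha => ?_) e he ?_ ?_
  · simp only [Bool.and_eq_true, beq_iff_eq, decide_eq_true_eq] at ha ⊢
    exact ⟨ha.1, by omega⟩
  · simp [h1, h2]
  · simp [h1, h2]

-- ===== PORT A =====
def go_down_check_right (curr_pos : Int × Int) (all_dead_positions : List (Int × Int × Int)) (all_obs : List (Int × Int × Int)) (visited : List (Int × Int × Int)) (width : Int) (height : Int) (goal_pos : Int × Int) (goal_found : List Int) : Bool :=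
  if curr_pos.2 == height then true
  else if !(pvInKeys curr_pos all_obs) then false
  else if pvInKeys curr_pos visited then false
  else
    let status := go_down_check_right (curr_pos.1, curr_pos.2 + 1) all_dead_positions all_obs visited width height goal_pos goal_found
    -- the writes 'goal_found[0] = True' / 'all_dead_positions[...] = 1' are side effects, not return value
    if !status then
      if pvInKeys (curr_pos.1 + 1, curr_pos.2) all_obs then true else false
    else true
termination_by (all_obs.countP (fun e => e.1 == curr_pos.1 && decide (curr_pos.2 ≤ e.2.1)))
decreasing_by
  rename_i _h1 h2 _h3
  exact pvInKeys_step curr_pos all_obs (by simpa using h2)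

-- ===== PORT B =====
-- phase 1 of Source B: the while loop collecting the chain; returns (chain, final y)
def pvWalk (all_obs visited : List (Int × Int × Int)) (height x y : Int) : List (Int × Int) × Int :=
  if !(y == height) && pvInKeys (x, y) all_obs && !(pvInKeys (x, y) visited) then
    let r := pvWalk all_obs visited height x (y + 1)
    ((x, y) :: r.1, r.2)
  else ([], y)
termination_by (all_obs.countP (fun e => e.1 == x && decide (y ≤ e.2.1)))
decreasing_by
  rename_i h
  exact pvInKeys_step (x, y) all_obs (by
    simp only [Bool.and_eq_true] at h
    exact h.1.2)

def go_down_check_right_alt (curr_pos : Int × Int) (all_dead_positions : List (Int × Int × Int)) (all_obs : List (Int × Int × Int)) (visited : List (Int × Int × Int)) (width : Int) (height : Int) (goal_pos : Int × Int) (goal_found : List Int) : Bool :=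
  let w := pvWalk all_obs visited height curr_pos.1 curr_pos.2
  -- phase 2 of Source B: the reversed loop carrying the status flag (the two dict writes are side effects)
  w.1.reverse.foldl (fun status p => if !status then pvInKeys (p.1 + 1, p.2) all_obs else status) (w.2 == height)

-- ===== PRECONDITION & SPEC =====
-- (no Pre_: the return-value claim is total; the only Python exception, IndexError on empty
-- goal_found at the side-effect write, is shared identically by A and B)
def Spec_go_down_check_right (curr_pos : Int × Int) (all_dead_positions : List (Int × Int × Int)) (all_obs : List (Int × Int × Int)) (visited : List (Int × Int × Int)) (width : Int) (height : Int) (goal_pos : Int × Int) (goal_found : List Int) (out : Bool) : Prop := out = go_down_check_right_alt curr_pos all_dead_positions all_obs visited width height goal_pos goal_found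
instance (curr_pos : Int × Int) (all_dead_positions : List (Int × Int × Int)) (all_obs : List (Int × Int × Int)) (visited : List (Int × Int × Int)) (width : Int) (height : Int) (goal_pos : Int × Int) (goal_found : List Int) (out : Bool) : Decidable (Spec_go_down_check_right curr_pos all_dead_positions all_obs visited width height goal_pos goal_found out) := by unfold Spec_go_down_check_right; infer_instance

-- ===== CLAIM (what is proved, stated in full; the proofs are below) =====
def Claim_equal_go_down_check_right : Prop := ∀ (curr_pos : Int × Int) (all_dead_positions : List (Int × Int × Int)) (all_obs : List (Int × Int × Int)) (visited : List (Int × Int × Int)) (width : Int) (height : Int) (goal_pos : Int × Int) (goal_found : List Int), Dom_go_down_check_right curr_pos all_dead_positions all_obs visited width height goal_pos goal_found → Spec_go_down_check_right curr_pos all_dead_positions all_obs visited width height goal_pos goal_found (go_down_check_right curr_pos all_dead_positions all_obs visited width height goal_pos goal_found)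

-- ===== LEMMAS AND PROOFS =====
-- A's recursion equals the foldr over the collected chain (Source B's reverse loop read back-to-front)
theorem pv_chain (all_dead_positions all_obs visited : List (Int × Int × Int))
    (width height : Int) (goal_pos : Int × Int) (goal_found : List Int) (x y : Int) :
    go_down_check_right (x, y) all_dead_positions all_obs visited width height goal_pos goal_found =
    (pvWalk all_obs visited height x y).1.foldr
      (fun p s => if !s then pvInKeys (p.1 + 1, p.2) all_obs else s)
      ((pvWalk all_obs visited height x y).2 == height) := by
  rw [go_down_check_right.eq_def, pvWalk.eq_def]
  by_cases hyh : (y == height) = true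
  · simp [hyh]
  · simp only [hyh]
    by_cases hobs : pvInKeys (x, y) all_obs = true
    · by_cases hvis : pvInKeys (x, y) visited = true
      · simp [hobs, hvis, show ¬ y = height from by simpa using hyh]
      · have IH := pv_chain all_dead_positions all_obs visited width height goal_pos goal_found x (y + 1)
        simp only [hobs, hvis, Bool.not_false, Bool.and_self, if_true, List.foldr_cons]
        rw [IH]
        cases hstat : (pvWalk all_obs visited height x (y + 1)).1.foldr
            (fun p s => if !s then pvInKeys (p.1 + 1, p.2) all_obs else s)
            ((pvWalk all_obs visited height x (y + 1)).2 == height) <;> simp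
    · simp [hobs, show ¬ y = height from by simpa using hyh]
termination_by (all_obs.countP (fun e => e.1 == x && decide (y ≤ e.2.1)))
decreasing_by exact pvInKeys_step (x, y) all_obs hobs

theorem pv_main (all_dead_positions all_obs visited : List (Int × Int × Int))
    (width height : Int) (goal_pos : Int × Int) (goal_found : List Int) (x y : Int) :
    go_down_check_right (x, y) all_dead_positions all_obs visited width height goal_pos goal_found =
    go_down_check_right_alt (x, y) all_dead_positions all_obs visited width height goal_pos goal_found := by
  rw [go_down_check_right_alt, List.foldl_reverse]
  exact pv_chain all_dead_positions all_obs visited width height goal_pos goal_found x y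

-- ===== VERDICT (by name: the statement is the Claim_ definition above) =====
theorem go_down_check_right_spec : Claim_equal_go_down_check_right := by
  intro ⟨x, y⟩ adp obs vis w h gp gf _
  exact pv_main adp obs vis w h gp gf x y
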